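-- pv_equiv track=rewrite | github.com/VasilisG/LSB-steganography | LsbSteg.py | _placeElementsToString
-- ===== SOURCE A (Python) =====
-- def _placeElementsToString(inList):
--
--     outString = ""
--     count = 0
--
--     for i in inList:
--
--         if i == 0:
--
--             outString += "0"
--             count += 1
--
--             if count == 8: break
--
--         else:
--
--              outString += "1"
--              count = 0
--
--     return outString
-- ===== SOURCE B (Python) =====
-- def _placeElementsToString(inList):
--     s = ''.join('0' if i == 0 else '1' for i in inList)
--     idx = s.find('00000000')
--     return s if idx == -1 else s[:idx + 8]
-- ===== Notes on version B (the rewrite author's own statement) =====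
-- stated objective: idiomatic
-- what changed: Replaces A's per-element counter-and-break loop by building the whole bit string with a join and locating the terminating run of eight zeros with str.find, slicing to include it.
import Mathlib
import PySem

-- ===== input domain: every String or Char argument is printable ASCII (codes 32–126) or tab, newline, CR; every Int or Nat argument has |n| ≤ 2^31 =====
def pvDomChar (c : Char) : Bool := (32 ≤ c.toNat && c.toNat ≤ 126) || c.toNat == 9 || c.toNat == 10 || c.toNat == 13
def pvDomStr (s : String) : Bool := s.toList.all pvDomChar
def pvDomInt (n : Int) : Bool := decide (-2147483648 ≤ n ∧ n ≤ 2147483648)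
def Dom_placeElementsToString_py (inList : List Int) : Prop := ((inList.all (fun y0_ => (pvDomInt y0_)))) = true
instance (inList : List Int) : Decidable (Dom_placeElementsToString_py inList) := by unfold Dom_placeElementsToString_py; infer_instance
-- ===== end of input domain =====

-- B builds the whole bit string with a join and locates the terminating run of eight zeros
-- with str.find, instead of A's per-element counter-and-break loop (objective: idiomatic).

-- ===== PORT A =====
-- A's loop: appends "0"/"1" to outString, counts consecutive zeros, breaks at 8.
def pvLoopA : List Int → List Char → Nat → List Char
  | [], outString, _ => outString
  | i :: rest, outString, count =>
    if i = 0 then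
      if count + 1 = 8 then outString ++ ['0']
      else pvLoopA rest (outString ++ ['0']) (count + 1)
    else pvLoopA rest (outString ++ ['1']) 0

def placeElementsToString_py (inList : List Int) : String :=
  String.ofList (pvLoopA inList [] 0)

-- ===== PORT B =====
-- '0' if i == 0 else '1'
def pvBit (i : Int) : Char := if i = 0 then '0' else '1'

def placeElementsToString_py_alt (inList : List Int) : String :=
  let s : List Char := inList.map pvBit
  let idx : Int := PySem.Chars.find s "00000000".toList
  if idx = -1 then String.ofList s
  else String.ofList (PySem.List.slice s none (some (idx + 8)))

-- ===== PRECONDITION & SPEC =====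
def Spec_placeElementsToString_py (inList : List Int) (out : String) : Prop := out = placeElementsToString_py_alt inList
instance (inList : List Int) (out : String) : Decidable (Spec_placeElementsToString_py inList out) := by unfold Spec_placeElementsToString_py; infer_instance

-- ===== CLAIM (what is proved, stated in full; the proofs are below) =====
def Claim_equal_placeElementsToString_py : Prop := ∀ (inList : List Int), Dom_placeElementsToString_py inList → Spec_placeElementsToString_py inList (placeElementsToString_py inList)

-- ===== LEMMAS AND PROOFS =====

-- suffix-building form of A's loop
def pvG : List Int → Nat → List Char
  | [], _ => []
  | i :: r, c =>
    if i = 0 then (if c + 1 = 8 then ['0'] else '0' :: pvG r (c + 1))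
    else '1' :: pvG r 0

-- char-level form: k = zeros still needed before the break
def pvH : List Char → Nat → List Char
  | [], _ => []
  | ch :: r, k =>
    if ch = '0' then (if k = 1 then ['0'] else ch :: pvH r (k - 1))
    else ch :: pvH r 8

lemma pvLoopA_eq (xs : List Int) (out : List Char) (c : Nat) :
    pvLoopA xs out c = out ++ pvG xs c := by
  induction xs generalizing out c with
  | nil => simp [pvLoopA, pvG]
  | cons i r ih =>
    simp only [pvLoopA, pvG]
    split_ifs <;> simp [ih]

lemma pvG_eq_pvH (xs : List Int) (c : Nat) (hc : c < 8) :
    pvG xs c = pvH (xs.map pvBit) (8 - c) := by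
  induction xs generalizing c with
  | nil => simp [pvG, pvH]
  | cons i r ih =>
    by_cases hi : i = 0
    · by_cases h8 : c + 1 = 8
      · simp [pvG, pvH, pvBit, hi, h8, show 8 - c = 1 by omega]
      · have h1 : 8 - c ≠ 1 := by omega
        have h2 : 8 - c - 1 = 8 - (c + 1) := by omega
        simp [pvG, pvH, pvBit, hi, h8, h1, h2, ih (c + 1) (by omega)]
    · simp [pvG, pvH, pvBit, hi, ih 0 (by omega)]

-- find points at j if the needle is a prefix of the drop at j and nowhere earlier
lemma pv_find_eq_of (l sub : List Char) (j : Nat)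
    (h1 : sub <+: l.drop j) (h2 : ∀ i < j, ¬ sub <+: l.drop i) :
    PySem.Chars.find l sub = (j : Int) := by
  have hinf : sub <:+: l :=
    (PySem.Chars.isIn_iff_infix sub l).mp ((PySem.Chars.exists_prefix_drop_iff_isIn sub l).mp ⟨j, h1⟩)
  have hnn : 0 ≤ PySem.Chars.find l sub := (PySem.Chars.find_nonneg_iff l sub).mpr hinf
  obtain ⟨hp, hmin⟩ := PySem.Chars.find_spec (s := l) (sub := sub) hnn
  have hF : (PySem.Chars.find l sub).toNat = j := by
    rcases lt_trichotomy (PySem.Chars.find l sub).toNat j with h | h | h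
    · exact absurd hp (h2 _ h)
    · exact h
    · exact absurd h1 (hmin j h)
  omega

lemma pv_find_shift (l sub : List Char) (m : Nat)
    (hm : ∀ i ≤ m, ¬ sub <+: l.drop i) :
    PySem.Chars.find l sub =
      if PySem.Chars.find (l.drop (m + 1)) sub = -1 then -1
      else (m + 1 : Int) + PySem.Chars.find (l.drop (m + 1)) sub := by
  by_cases hc : PySem.Chars.find (l.drop (m + 1)) sub = -1
  · rw [if_pos hc]
    rw [PySem.Chars.find_eq_neg_one_iff] at hc ⊢
    intro hinf
    obtain ⟨j, hj⟩ := (PySem.Chars.exists_prefix_drop_iff_isIn sub l).mpr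
      ((PySem.Chars.isIn_iff_infix sub l).mpr hinf)
    by_cases hjm : j ≤ m
    · exact hm j hjm hj
    · apply hc
      apply (PySem.Chars.isIn_iff_infix sub (l.drop (m + 1))).mp
      apply (PySem.Chars.exists_prefix_drop_iff_isIn sub (l.drop (m + 1))).mp
      refine ⟨j - (m + 1), ?_⟩
      have h2 : List.drop (j - (m + 1)) (List.drop (m + 1) l) = List.drop j l := by
        rw [List.drop_drop]; congr 1; omega
      rwa [h2]
  · rw [if_neg hc]
    have hnn : 0 ≤ PySem.Chars.find (l.drop (m + 1)) sub := by
      have := PySem.Chars.neg_one_le_find (l.drop (m + 1)) sub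
      omega
    obtain ⟨hp, hmin⟩ := PySem.Chars.find_spec (s := l.drop (m + 1)) (sub := sub) hnn
    set j0 := (PySem.Chars.find (l.drop (m + 1)) sub).toNat with hj0
    have heq : PySem.Chars.find l sub = ((m + 1 + j0 : Nat) : Int) := by
      apply pv_find_eq_of
      · have h2 : List.drop j0 (List.drop (m + 1) l) = List.drop (m + 1 + j0) l := by
          rw [List.drop_drop]
        rwa [← h2]
      · intro i hi
        by_cases him : i ≤ m
        · exact hm i him
        · intro hpre
          refine hmin (i - (m + 1)) (by omega) ?_
          have h2 : List.drop (i - (m + 1)) (List.drop (m + 1) l) = List.drop i l := by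
            rw [List.drop_drop]; congr 1; omega
          rwa [h2]
    rw [heq]; omega

lemma pvH_zeros_prefix (k : Nat) (t : List Char) :
    pvH (List.replicate (k + 1) '0' ++ t) (k + 1) = List.replicate (k + 1) '0' := by
  induction k generalizing t with
  | zero => simp [pvH]
  | succ k ih =>
    rw [List.replicate_succ, List.cons_append,
        show pvH ('0' :: (List.replicate (k + 1) '0' ++ t)) (k + 1 + 1)
            = '0' :: pvH (List.replicate (k + 1) '0' ++ t) (k + 1) from by
          simp [pvH],
        ih t, ← List.replicate_succ]

lemma pvH_all_zeros (m k : Nat) (h : m < k) :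
    pvH (List.replicate m '0') k = List.replicate m '0' := by
  induction m generalizing k with
  | zero => simp [pvH]
  | succ m ih =>
    have hk : k ≠ 1 := by omega
    rw [List.replicate_succ,
        show pvH ('0' :: List.replicate m '0') k = '0' :: pvH (List.replicate m '0') (k - 1) from by
          simp [pvH, hk],
        ih (k - 1) (by omega), ← List.replicate_succ]

lemma pvH_run (m : Nat) (t : List Char) (ch : Char) (k : Nat) (hk : m < k) (hch : ch ≠ '0') :
    pvH (List.replicate m '0' ++ ch :: t) k = List.replicate m '0' ++ ch :: pvH t 8 := by
  induction m generalizing k with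
  | zero => simp [pvH, hch]
  | succ m ih =>
    have hk1 : k ≠ 1 := by omega
    rw [List.replicate_succ, List.cons_append,
        show pvH ('0' :: (List.replicate m '0' ++ ch :: t)) k
            = '0' :: pvH (List.replicate m '0' ++ ch :: t) (k - 1) from by
          simp [pvH, hk1],
        ih (k - 1) (by omega)]
    simp

lemma pvH_find (cs : List Char) :
    pvH cs 8 =
      if PySem.Chars.find cs (List.replicate 8 '0') = -1 then cs
      else cs.take ((PySem.Chars.find cs (List.replicate 8 '0')).toNat + 8) := by
  suffices H : ∀ n (cs : List Char), cs.length ≤ n →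
      pvH cs 8 =
        if PySem.Chars.find cs (List.replicate 8 '0') = -1 then cs
        else cs.take ((PySem.Chars.find cs (List.replicate 8 '0')).toNat + 8) from
    H cs.length cs le_rfl
  intro n
  induction n with
  | zero =>
    intro cs hle
    have : cs = [] := List.eq_nil_of_length_eq_zero (by omega)
    subst this
    have hf : PySem.Chars.find ([] : List Char) (List.replicate 8 '0') = -1 := by decide
    simp [pvH]
  | succ n ih =>
    intro cs hle
    by_cases hpre : List.replicate 8 '0' <+: cs
    · obtain ⟨t, ht⟩ := hpre
      have hf : PySem.Chars.find cs (List.replicate 8 '0') = (0 : Int) := by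
        simpa using pv_find_eq_of cs (List.replicate 8 '0') 0
          (by simpa using ⟨t, ht⟩) (fun i hi => absurd hi (Nat.not_lt_zero i))
      rw [hf]
      subst ht
      rw [show (8 : Nat) = 7 + 1 from rfl, pvH_zeros_prefix 7 t]
      have : ((0 : Int)).toNat + 8 = (List.replicate (7 + 1) '0').length := by simp
      rw [if_neg (by decide), this, List.take_left]
    · have hzs : cs.takeWhile (fun c => c == '0') =
          List.replicate (cs.takeWhile (fun c => c == '0')).length '0' := by
        apply List.eq_replicate_of_mem
        intro b hb
        have := List.mem_takeWhile_imp hb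
        simpa using this
      set m := (cs.takeWhile (fun c => c == '0')).length with hmdef
      have hsplit : List.replicate m '0' ++ cs.dropWhile (fun c => c == '0') = cs := by
        rw [← hzs]; exact List.takeWhile_append_dropWhile
      have hm : m < 8 := by
        by_contra hge
        rw [not_lt] at hge
        apply hpre
        refine List.IsPrefix.trans ?_ ⟨cs.dropWhile (fun c => c == '0'), hsplit⟩
        exact ⟨List.replicate (m - 8) '0', by rw [← List.replicate_add]; congr 1; omega⟩
      cases hds : cs.dropWhile (fun c => c == '0') with
      | nil =>
        have hcs' : cs = List.replicate m '0' := by rw [← hsplit, hds, List.append_nil]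
        have hf : PySem.Chars.find cs (List.replicate 8 '0') = -1 := by
          rw [PySem.Chars.find_eq_neg_one_iff]
          intro hinf
          have := hinf.length_le
          rw [hcs'] at this
          simp at this
          omega
        rw [if_pos hf, hcs', pvH_all_zeros m 8 hm]
      | cons ch r =>
        have hch : ch ≠ '0' := by
          have := List.head?_dropWhile_not (fun c => c == '0') cs
          rw [hds] at this
          simpa using this
        have hcs' : cs = List.replicate m '0' ++ ch :: r := by rw [← hsplit, hds]
        have hnopre : ∀ i ≤ m, ¬ List.replicate 8 '0' <+: cs.drop i := by
          intro i him hpre'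
          have hdropi : cs.drop i = List.replicate (m - i) '0' ++ ch :: r := by
            rw [hcs',
                show List.replicate m '0' = List.replicate i '0' ++ List.replicate (m - i) '0' from by
                  rw [← List.replicate_add]; congr 1; omega,
                List.append_assoc,
                show i = (List.replicate i '0').length + 0 from by simp]
            simpa using List.drop_length_add_append
              (l₁ := List.replicate i '0') (l₂ := List.replicate (m - i) '0' ++ ch :: r) 0
          obtain ⟨t, ht⟩ := hpre'
          have h1 : (cs.drop i)[m - i]? = some ch := by
            rw [hdropi, List.getElem?_append_right (by simp)]
            simp
          have hmi : m - i < 8 := by omega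
          have h2 : (cs.drop i)[m - i]? = some '0' := by
            rw [← ht, List.getElem?_append_left (by simpa using hmi), List.getElem?_replicate]
            simp [hmi]
          rw [h1] at h2
          exact hch (by simpa using h2)
        have hshift := pv_find_shift cs (List.replicate 8 '0') m hnopre
        have hdrop : cs.drop (m + 1) = r := by
          rw [hcs', show m + 1 = (List.replicate m '0').length + 1 from by rw [List.length_replicate]]
          simpa using List.drop_length_add_append
              (l₁ := List.replicate m '0') (l₂ := ch :: r) 1
        rw [hdrop] at hshift
        have ihr := ih r (by
          have hlen := congrArg List.length hcs'
          simp at hlen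
          omega)
        have hLHS : pvH cs 8 = List.replicate m '0' ++ ch :: pvH r 8 := by
          rw [hcs']; exact pvH_run m r ch 8 hm hch
        by_cases hFr : PySem.Chars.find r (List.replicate 8 '0') = -1
        · rw [if_pos hFr] at hshift
          rw [hshift, if_pos rfl, hLHS]
          rw [if_pos hFr] at ihr
          rw [ihr, ← hcs']
        · rw [if_neg hFr] at hshift ihr
          have hnnr : 0 ≤ PySem.Chars.find r (List.replicate 8 '0') := by
            have := PySem.Chars.neg_one_le_find r (List.replicate 8 '0')
            omega
          set j0 := (PySem.Chars.find r (List.replicate 8 '0')).toNat with hj0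
          have hfc : PySem.Chars.find cs (List.replicate 8 '0') = ((m + 1 + j0 : Nat) : Int) := by
            rw [hshift]; omega
          rw [hfc, if_neg (by omega), hLHS, ihr, hcs']
          rw [show (((m + 1 + j0 : Nat) : Int)).toNat + 8 = m + 1 + j0 + 8 from by omega]
          have htk : List.take (m + 1 + j0 + 8) (List.replicate m '0') = List.replicate m '0' :=
            List.take_of_length_le (by rw [List.length_replicate]; omega)
          rw [List.take_append,
              show m + 1 + j0 + 8 - (List.replicate m '0').length = (j0 + 8) + 1 from by
                rw [List.length_replicate]; omega,
              List.take_succ_cons, htk]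

-- ===== VERDICT (by name: the statement is the Claim_ definition above) =====
theorem placeElementsToString_py_spec : Claim_equal_placeElementsToString_py := by
  intro inList _
  unfold Spec_placeElementsToString_py placeElementsToString_py placeElementsToString_py_alt
  rw [pvLoopA_eq, List.nil_append, pvG_eq_pvH inList 0 (by omega)]
  simp only [Nat.sub_zero, show "00000000".toList = List.replicate 8 '0' from by decide]
  rw [pvH_find]
  by_cases hF : PySem.Chars.find (inList.map pvBit) (List.replicate 8 '0') = -1
  · rw [if_pos hF, if_pos hF]
  · rw [if_neg hF, if_neg hF]
    congr 1
    have hnn : 0 ≤ PySem.Chars.find (inList.map pvBit) (List.replicate 8 '0') := by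
      have := PySem.Chars.neg_one_le_find (inList.map pvBit) (List.replicate 8 '0')
      omega
    rw [show PySem.Chars.find (inList.map pvBit) (List.replicate 8 '0') + 8 =
          (((PySem.Chars.find (inList.map pvBit) (List.replicate 8 '0')).toNat + 8 : Nat) : Int) from by
        omega,
      PySem.List.slice_to_natCast]
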